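-- pv_equiv track=rewrite | github.com/deepak-subramanian-takeda/RFantibody_partialflow | identify_hotspots.py | get_cdr_residue_keys
-- ===== SOURCE A (Python) =====
-- from typing import Dict, List, Optional, Set, Tuple
--
-- CDR_NAMES = ["H1", "H2", "H3", "L1", "L2", "L3"]
--
-- def get_cdr_residue_keys(
--     cdr_positions: Dict[str, Set[int]],
--     abs_index_map: Dict[Tuple[str, int], int],
-- ) -> Dict[str, Set[Tuple[str, int]]]:
--     """
--     Convert CDR absolute indices back to (chain, resnum) sets,
--     grouped by CDR name.
--     """
--     # Invert the abs_index_map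
--     inv_map: Dict[int, Tuple[str, int]] = {v: k for k, v in abs_index_map.items()}
--
--     cdr_keys: Dict[str, Set[Tuple[str, int]]] = {n: set() for n in CDR_NAMES}
--     for cdr_name, abs_idxs in cdr_positions.items():
--         for idx in abs_idxs:
--             key = inv_map.get(idx)
--             if key is not None:
--                 cdr_keys[cdr_name].add(key)
--     return cdr_keys
-- ===== SOURCE B (Python) =====
-- CDR_NAMES = ["H1", "H2", "H3", "L1", "L2", "L3"]
--
-- def get_cdr_residue_keys(cdr_positions, abs_index_map):
--     """
--     Convert CDR absolute indices back to (chain, resnum) sets,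
--     grouped by CDR name.
--     """
--     def chain_key(idx):
--         # Direct search: the (chain, resnum) whose absolute index is idx.
--         for key, abs_idx in abs_index_map.items():
--             if abs_idx == idx:
--                 return key
--         return None
--
--     cdr_keys = {}
--     for name in CDR_NAMES:
--         keys = set()
--         for idx in cdr_positions.get(name, ()):
--             key = chain_key(idx)
--             if key is not None:
--                 keys.add(key)
--         cdr_keys[name] = keys
--     return cdr_keys
-- ===== Notes on version B (the rewrite author's own statement) =====
-- stated objective: simpler
-- what changed: B drops the inverted dict entirely: it builds the result per fixed CDR name and resolves each absolute index by a direct linear search of abs_index_map; Pre_ excludes inputs where a CDR set references an absolute index occurring more than once among abs_index_map's values (there A's dict-overwrite representative, last write, vs B's first match is accidental either way), duplicate CDR-name keys in cdr_positions (a Python dict cannot carry them), and inputs where A raises KeyError (a name outside CDR_NAMES whose set hits a mapped index).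
import Mathlib
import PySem

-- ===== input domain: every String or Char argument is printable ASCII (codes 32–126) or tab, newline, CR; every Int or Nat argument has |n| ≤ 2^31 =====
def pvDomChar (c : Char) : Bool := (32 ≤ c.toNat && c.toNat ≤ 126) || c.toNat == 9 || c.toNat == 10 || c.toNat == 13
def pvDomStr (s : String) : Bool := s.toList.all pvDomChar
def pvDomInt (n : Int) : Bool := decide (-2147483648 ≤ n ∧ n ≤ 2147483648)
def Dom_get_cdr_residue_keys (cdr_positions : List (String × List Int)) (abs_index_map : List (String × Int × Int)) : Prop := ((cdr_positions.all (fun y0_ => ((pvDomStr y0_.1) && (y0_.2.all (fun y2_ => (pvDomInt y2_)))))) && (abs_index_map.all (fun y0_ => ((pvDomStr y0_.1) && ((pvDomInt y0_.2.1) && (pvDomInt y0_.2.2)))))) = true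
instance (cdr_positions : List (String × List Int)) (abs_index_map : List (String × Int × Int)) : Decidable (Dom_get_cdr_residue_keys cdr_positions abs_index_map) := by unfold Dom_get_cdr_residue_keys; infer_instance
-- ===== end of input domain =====

-- B drops the inverted dict: it builds the result per fixed CDR name and resolves each
-- absolute index by a direct linear search of abs_index_map; objective: simpler, not speed.

def pvCDR_NAMES : List String := ["H1", "H2", "H3", "L1", "L2", "L3"]

-- ===== PORT A =====
def get_cdr_residue_keys (cdr_positions : List (String × List Int)) (abs_index_map : List (String × Int × Int)) : List (String × List (String × Int)) :=
  -- inv_map = {v: k for k, v in abs_index_map.items()}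
  let inv_map : PySem.Dict Int (String × Int) :=
    abs_index_map.foldl (fun d e => d.insert e.2.2 (e.1, e.2.1)) PySem.Dict.empty
  -- cdr_keys = {n: set() for n in CDR_NAMES}
  let init : PySem.Dict String (PySem.Set (String × Int)) :=
    pvCDR_NAMES.foldl (fun d n => d.insert n PySem.Set.empty) PySem.Dict.empty
  let final := cdr_positions.foldl (fun d p =>
    p.2.foldl (fun d idx =>
      match inv_map.get? idx with
      | some key =>
        -- cdr_keys[cdr_name].add(key): lookup, add, store back
        match d.get? p.1 with
        | some s => d.insert p.1 (PySem.Set.add s key)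
        | none => d  -- Python raises KeyError here (name not in CDR_NAMES); excluded by Pre_
      | none => d) d) init
  final.items

-- ===== PORT B =====
-- chain_key(idx): linear scan of abs_index_map.items(), return the first key whose value is idx
def pvChainKey (abs_index_map : List (String × Int × Int)) (idx : Int) : Option (String × Int) :=
  match abs_index_map.find? (fun e => e.2.2 == idx) with
  | some e => some (e.1, e.2.1)
  | none => none

def get_cdr_residue_keys_alt (cdr_positions : List (String × List Int)) (abs_index_map : List (String × Int × Int)) : List (String × List (String × Int)) :=
  -- cdr_keys = {}; for name in CDR_NAMES: build keys, then cdr_keys[name] = keys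
  -- (the six names are distinct, so each assignment appends a fresh entry)
  pvCDR_NAMES.foldl (fun cdr_keys name =>
    let keys : PySem.Set (String × Int) :=
      ((PySem.Dict.mk cdr_positions).getD name []).foldl (fun s idx =>
        match pvChainKey abs_index_map idx with
        | some key => PySem.Set.add s key
        | none => s) PySem.Set.empty
    cdr_keys ++ [(name, keys)]) []

-- ===== PRECONDITION & SPEC =====
-- Pre_ requires distinct cdr_positions keys (a Python dict cannot carry duplicates), excludes
-- the inputs where some CDR set references an absolute index that occurs more than once among
-- the values of abs_index_map (there A's dict-overwrite choice of representative key is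
-- accidental — last write vs B's first match), and excludes exactly the inputs where Python A
-- raises KeyError: a CDR name outside CDR_NAMES whose set contains a mapped index.
def Pre_get_cdr_residue_keys (cdr_positions : List (String × List Int)) (abs_index_map : List (String × Int × Int)) : Prop :=
  (cdr_positions.map Prod.fst).Nodup ∧
  (∀ p ∈ cdr_positions, ∀ idx ∈ p.2, (abs_index_map.map (fun e => e.2.2)).count idx ≤ 1) ∧
  ∀ p ∈ cdr_positions, p.1 ∈ pvCDR_NAMES ∨ ∀ idx ∈ p.2, ∀ e ∈ abs_index_map, e.2.2 ≠ idx
instance (cdr_positions : List (String × List Int)) (abs_index_map : List (String × Int × Int)) : Decidable (Pre_get_cdr_residue_keys cdr_positions abs_index_map) := by unfold Pre_get_cdr_residue_keys; infer_instance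

def pvWitness_get_cdr_residue_keys : (List (String × List Int)) × (List (String × Int × Int)) :=
  ([("H1", [5]), ("L2", [7, 9])], [("A", 1, 5), ("A", 2, 7)])

def Spec_get_cdr_residue_keys (cdr_positions : List (String × List Int)) (abs_index_map : List (String × Int × Int)) (out : List (String × List (String × Int))) : Prop := out = get_cdr_residue_keys_alt cdr_positions abs_index_map
instance (cdr_positions : List (String × List Int)) (abs_index_map : List (String × Int × Int)) (out : List (String × List (String × Int))) : Decidable (Spec_get_cdr_residue_keys cdr_positions abs_index_map out) := by unfold Spec_get_cdr_residue_keys; infer_instance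

-- ===== CLAIM (what is proved, stated in full; the proofs are below) =====
def Claim_equal_get_cdr_residue_keys : Prop := ∀ (cdr_positions : List (String × List Int)) (abs_index_map : List (String × Int × Int)), Dom_get_cdr_residue_keys cdr_positions abs_index_map → Pre_get_cdr_residue_keys cdr_positions abs_index_map → Spec_get_cdr_residue_keys cdr_positions abs_index_map (get_cdr_residue_keys cdr_positions abs_index_map)

-- ===== LEMMAS AND PROOFS =====

-- one conditional set-add step, the shape of A's inner loop
def pvStepSet (inv : PySem.Dict Int (String × Int)) (s : PySem.Set (String × Int)) (idx : Int) : PySem.Set (String × Int) :=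
  match inv.get? idx with
  | some key => PySem.Set.add s key
  | none => s

-- the total contribution of all of ps's entries named n to A's set for n
def pvG (inv : PySem.Dict Int (String × Int)) (ps : List (String × List Int)) (n : String) (s : PySem.Set (String × Int)) : PySem.Set (String × Int) :=
  ps.foldl (fun s p => if p.1 = n then p.2.foldl (pvStepSet inv) s else s) s

theorem pv_invA_get? (l : List (String × Int × Int)) (d : PySem.Dict Int (String × Int)) (v : Int) :
    (l.foldl (fun d e => d.insert e.2.2 (e.1, e.2.1)) d).get? v
      = match l.reverse.find? (fun e => e.2.2 == v) with
        | some e => some (e.1, e.2.1)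
        | none => d.get? v := by
  induction l generalizing d with
  | nil => simp
  | cons e l ih =>
    simp only [List.foldl_cons, List.reverse_cons, List.find?_append, ih]
    by_cases h : e.2.2 = v
    · have hb : (e.2.2 == v) = true := beq_iff_eq.mpr h
      cases hf : l.reverse.find? (fun e => e.2.2 == v) <;>
        simp [List.find?, h]
    · have hb : (e.2.2 == v) = false := beq_eq_false_iff_ne.mpr h
      cases hf : l.reverse.find? (fun e => e.2.2 == v) <;>
        simp [List.find?, hb, Ne.symm h, PySem.Dict.get?_insert]

theorem pv_find?_reverse (l : List (String × Int × Int)) (v : Int)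
    (hc : (l.map (fun e => e.2.2)).count v ≤ 1) :
    l.reverse.find? (fun e => e.2.2 == v) = l.find? (fun e => e.2.2 == v) := by
  induction l with
  | nil => rfl
  | cons e l ih =>
    simp only [List.reverse_cons, List.find?_append, List.find?]
    by_cases h : e.2.2 = v
    · have hb : (e.2.2 == v) = true := beq_iff_eq.mpr h
      have hc0 : (l.map (fun e => e.2.2)).count v = 0 := by
        simp only [List.map_cons, List.count_cons, hb, if_true] at hc
        omega
      have hnone : l.reverse.find? (fun e => e.2.2 == v) = none := by
        refine List.find?_eq_none.mpr (fun x hx => ?_)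
        have hxm : x.2.2 ≠ v := by
          intro hxv
          have hmem : v ∈ l.map (fun e => e.2.2) :=
            List.mem_map.mpr ⟨x, List.mem_reverse.mp hx, hxv⟩
          have := List.count_pos_iff.mpr hmem
          omega
        simpa using hxm
      rw [hnone]
      simp [hb]
    · have hb : (e.2.2 == v) = false := beq_eq_false_iff_ne.mpr h
      have hc' : (l.map (fun e => e.2.2)).count v ≤ 1 := by
        simp only [List.map_cons, List.count_cons, hb] at hc
        omega
      rw [ih hc']
      cases l.find? (fun e => e.2.2 == v) <;> simp [hb]

theorem pv_inv_eq_chain (l : List (String × Int × Int)) (v : Int)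
    (hc : (l.map (fun e => e.2.2)).count v ≤ 1) :
    (l.foldl (fun d e => d.insert e.2.2 (e.1, e.2.1)) (PySem.Dict.empty : PySem.Dict Int (String × Int))).get? v
      = pvChainKey l v := by
  rw [pv_invA_get?, pv_find?_reverse l v hc, pvChainKey]
  cases l.find? (fun e => e.2.2 == v) <;> simp [PySem.Dict.get?_empty]

theorem pv_stepSet_eq_chain (inv : PySem.Dict Int (String × Int)) (m : List (String × Int × Int))
    (idxs : List Int) (h : ∀ i ∈ idxs, inv.get? i = pvChainKey m i) (s : PySem.Set (String × Int)) :
    idxs.foldl (pvStepSet inv) s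
      = idxs.foldl (fun s idx =>
          match pvChainKey m idx with
          | some key => PySem.Set.add s key
          | none => s) s := by
  induction idxs generalizing s with
  | nil => rfl
  | cons i idxs ih =>
    simp only [List.foldl_cons, pvStepSet, h i (List.mem_cons_self)]
    exact ih (fun j hj => h j (List.mem_cons_of_mem i hj)) _

-- an element of cdr_positions.get(n, ()) comes from the first entry of cdr_positions named n
theorem pv_getD_mem (ps : List (String × List Int)) (n : String) (i : Int)
    (hi : i ∈ (PySem.Dict.mk ps).getD n []) : ∃ p ∈ ps, p.1 = n ∧ i ∈ p.2 := by
  induction ps with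
  | nil =>
    have h0 : (PySem.Dict.mk ([] : List (String × List Int))).getD n [] = [] := rfl
    rw [h0] at hi
    cases hi
  | cons p ps ih =>
    obtain ⟨k, xs⟩ := p
    rw [PySem.Dict.getD_eq_get?_getD, PySem.Dict.get?_mk_cons] at hi
    by_cases hk : k = n
    · simp only [hk, beq_self_eq_true, if_true, Option.getD_some] at hi
      exact ⟨(k, xs), List.mem_cons_self, hk, hi⟩
    · simp only [beq_eq_false_iff_ne.mpr hk] at hi
      obtain ⟨q, hq, hqn, hqi⟩ := ih (by rw [PySem.Dict.getD_eq_get?_getD]; exact hi)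
      exact ⟨q, List.mem_cons_of_mem _ hq, hqn, hqi⟩

theorem pv_foldIdx (inv : PySem.Dict Int (String × Int)) (idxs : List Int) (name : String)
    (d : PySem.Dict String (PySem.Set (String × Int))) (hnd : d.keys.Nodup) :
    (idxs.foldl (fun d idx =>
      match inv.get? idx with
      | some key =>
        match d.get? name with
        | some s => d.insert name (PySem.Set.add s key)
        | none => d
      | none => d) d).items
      = d.items.map (fun e => if e.1 = name then (e.1, idxs.foldl (pvStepSet inv) e.2) else e) := by
  induction idxs generalizing d with
  | nil =>
    simp only [List.foldl_nil]
    conv_lhs => rw [← List.map_id d.items]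
    apply List.map_congr_left
    intro e _
    obtain ⟨a, b⟩ := e
    by_cases h : a = name <;> simp [h]
  | cons idx rest ih =>
    simp only [List.foldl_cons]
    cases hi : inv.get? idx with
    | none =>
      rw [ih d hnd]
      apply List.map_congr_left
      intro e _
      by_cases h : e.1 = name <;> simp [h, pvStepSet, hi]
    | some key =>
      cases hg : d.get? name with
      | none =>
        rw [ih d hnd]
        apply List.map_congr_left
        intro e he
        have hne : e.1 ≠ name := by
          intro hh
          have hm : d.get? e.1 = some e.2 :=
            PySem.Dict.get?_of_mem_items d (by simpa using he) hnd
          rw [hh, hg] at hm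
          cases hm
        simp [hne]
      | some s =>
        have hc : d.contains name = true := by
          rw [PySem.Dict.contains_eq_isSome_get?, hg]; rfl
        have hk : (d.insert name (PySem.Set.add s key)).keys.Nodup := by
          rw [PySem.Dict.keys_insert_of_contains d _ hc]; exact hnd
        rw [ih _ hk, PySem.Dict.items_insert_of_contains d _ hc, List.map_map]
        apply List.map_congr_left
        intro e he
        by_cases h : e.1 = name
        · have hm : d.get? e.1 = some e.2 :=
            PySem.Dict.get?_of_mem_items d (by simpa using he) hnd
          rw [h, hg] at hm
          have he2 : e.2 = s := (Option.some.inj hm).symm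
          simp [Function.comp, h, he2, pvStepSet, hi]
        · simp [Function.comp, h, beq_eq_false_iff_ne.mpr h]

theorem pv_foldOuter (inv : PySem.Dict Int (String × Int)) (ps : List (String × List Int))
    (d : PySem.Dict String (PySem.Set (String × Int))) (hnd : d.keys.Nodup) :
    (ps.foldl (fun d p =>
      p.2.foldl (fun d idx =>
        match inv.get? idx with
        | some key =>
          match d.get? p.1 with
          | some s => d.insert p.1 (PySem.Set.add s key)
          | none => d
        | none => d) d) d).items
      = d.items.map (fun e => (e.1, pvG inv ps e.1 e.2)) := by
  induction ps generalizing d with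
  | nil =>
    simp only [List.foldl_nil, pvG, List.foldl_nil]
    conv_lhs => rw [← List.map_id d.items]
    apply List.map_congr_left
    intro e _
    simp
  | cons p ps ih =>
    simp only [List.foldl_cons]
    have hstep := pv_foldIdx inv p.2 p.1 d hnd
    have hkeys : ((p.2.foldl (fun d idx =>
        match inv.get? idx with
        | some key =>
          match d.get? p.1 with
          | some s => d.insert p.1 (PySem.Set.add s key)
          | none => d
        | none => d) d)).keys = d.keys := by
      simp only [PySem.Dict.keys, hstep, List.map_map]
      apply List.map_congr_left
      intro e _
      by_cases h : e.1 = p.1 <;> simp [h]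
    have hk := hnd
    rw [← hkeys] at hk
    rw [ih _ hk, hstep, List.map_map]
    apply List.map_congr_left
    intro e _
    by_cases h : e.1 = p.1
    · simp [Function.comp, h, pvG, List.foldl_cons]
    · have h' : ¬ p.1 = e.1 := fun hh => h hh.symm
      simp [Function.comp, h, h', pvG, List.foldl_cons]

theorem pvG_of_not_mem (inv : PySem.Dict Int (String × Int)) (ps : List (String × List Int))
    (n : String) (h : n ∉ ps.map Prod.fst) (s : PySem.Set (String × Int)) :
    pvG inv ps n s = s := by
  induction ps generalizing s with
  | nil => rfl
  | cons p ps ih =>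
    simp only [List.map_cons, List.mem_cons, not_or] at h
    simp only [pvG, List.foldl_cons] at *
    rw [if_neg (fun hh => h.1 hh.symm), ih h.2]

theorem pvG_eq_getD (inv : PySem.Dict Int (String × Int)) (ps : List (String × List Int))
    (hnd : (ps.map Prod.fst).Nodup) (n : String) (s : PySem.Set (String × Int)) :
    pvG inv ps n s = ((PySem.Dict.mk ps).getD n []).foldl (pvStepSet inv) s := by
  induction ps generalizing s with
  | nil => rfl
  | cons p ps ih =>
    obtain ⟨k, idxs⟩ := p
    simp only [List.map_cons, List.nodup_cons] at hnd
    by_cases h : k = n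
    · have hg : (PySem.Dict.mk ((k, idxs) :: ps)).getD n [] = idxs := by
        rw [PySem.Dict.getD_eq_get?_getD, PySem.Dict.get?_mk_cons]
        simp [h]
      rw [hg]
      simp only [pvG, List.foldl_cons, if_pos h]
      exact pvG_of_not_mem inv ps n (h ▸ hnd.1) _
    · have hg : (PySem.Dict.mk ((k, idxs) :: ps)).getD n [] = (PySem.Dict.mk ps).getD n [] := by
        rw [PySem.Dict.getD_eq_get?_getD, PySem.Dict.get?_mk_cons, PySem.Dict.getD_eq_get?_getD]
        simp [h]
      rw [hg, ← ih hnd.2]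
      simp only [pvG, List.foldl_cons, if_neg h]

-- B's result-building fold (append one fresh entry per name) is a map over the names
theorem pv_foldl_append_map {α β : Type} (f : α → β) (ns : List α) (acc : List (α × β)) :
    ns.foldl (fun r n => r ++ [(n, f n)]) acc = acc ++ ns.map (fun n => (n, f n)) := by
  induction ns generalizing acc with
  | nil => simp
  | cons n ns ih => simp [ih]

-- ===== VERDICT (by name: the statement is the Claim_ definition above) =====
theorem get_cdr_residue_keys_spec : Claim_equal_get_cdr_residue_keys := by
  intro ps abs _ hpre
  unfold Spec_get_cdr_residue_keys
  simp only [get_cdr_residue_keys, get_cdr_residue_keys_alt]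
  have hnd0 : ((pvCDR_NAMES.foldl (fun d n => d.insert n PySem.Set.empty) (PySem.Dict.empty : PySem.Dict String (PySem.Set (String × Int))))).keys.Nodup := by decide
  rw [pv_foldOuter _ ps _ hnd0]
  have hitems : ((pvCDR_NAMES.foldl (fun d n => d.insert n PySem.Set.empty) (PySem.Dict.empty : PySem.Dict String (PySem.Set (String × Int))))).items
      = pvCDR_NAMES.map (fun n => (n, ([] : PySem.Set (String × Int)))) := by rfl
  rw [hitems, List.map_map,
      pv_foldl_append_map (fun name => ((PySem.Dict.mk ps).getD name []).foldl (fun s idx =>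
        match pvChainKey abs idx with
        | some key => PySem.Set.add s key
        | none => s) PySem.Set.empty) pvCDR_NAMES []]
  simp only [List.nil_append]
  apply List.map_congr_left
  intro n _
  simp only [Function.comp]
  refine congrArg (Prod.mk n) ?_
  rw [pvG_eq_getD _ ps hpre.1 n]
  refine pv_stepSet_eq_chain _ abs _ ?_ _
  intro i hi
  obtain ⟨p, hp, _, hip⟩ := pv_getD_mem ps n i hi
  exact pv_inv_eq_chain abs i (hpre.2.1 p hp i hip)
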